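-- pv_equiv track=rewrite | github.com/saisuryadv/xmr-evolve | src/xmr_c/f90_to_f77.py | split_param_assignments
-- ===== SOURCE A (Python) =====
-- def split_param_assignments(s):
--     """Split "A = 1, B = 2" into [("A","1"), ("B","2")]"""
--     parts = []
--     depth = 0
--     current = ''
--     for ch in s:
--         if ch == '(':
--             depth += 1
--             current += ch
--         elif ch == ')':
--             depth -= 1
--             current += ch
--         elif ch == ',' and depth == 0:
--             parts.append(current)
--             current = ''
--         else:
--             current += ch
--     if current.strip():
--         parts.append(current)
--
--     result = []
--     for part in parts:
--         if '=' in part: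
--             name, val = part.split('=', 1)
--             result.append((name.strip(), val.strip()))
--     return result
-- ===== SOURCE B (Python) =====
-- def split_param_assignments(s):
--     """Single-pass state machine: parse directly to (name, value) pairs."""
--     result = []
--     depth = 0
--     name = ''
--     value = ''
--     seen_eq = False
--     for ch in s:
--         if ch == '(':
--             depth += 1
--             if seen_eq:
--                 value += ch
--             else:
--                 name += ch
--         elif ch == ')':
--             depth -= 1
--             if seen_eq:
--                 value += ch
--             else:
--                 name += ch
--         elif ch == ',' and depth == 0:
--             if seen_eq:
--                 result.append((name.strip(), value.strip()))
--             name = ''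
--             value = ''
--             seen_eq = False
--         elif ch == '=' and not seen_eq:
--             seen_eq = True
--         elif seen_eq:
--             value += ch
--         else:
--             name += ch
--     if seen_eq:
--         result.append((name.strip(), value.strip()))
--     return result
-- ===== Notes on version B (the rewrite author's own statement) =====
-- stated objective: alternative
-- what changed: Replaces A's two-phase pipeline (depth-aware split into an intermediate parts list, then a second pass that re-scans each part for '=' and splits it) with a single-pass state machine that parses directly to (name, value) pairs using name/value buffers and a seen_eq flag, with no intermediate list and no substring search or split.
import Mathlib
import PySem

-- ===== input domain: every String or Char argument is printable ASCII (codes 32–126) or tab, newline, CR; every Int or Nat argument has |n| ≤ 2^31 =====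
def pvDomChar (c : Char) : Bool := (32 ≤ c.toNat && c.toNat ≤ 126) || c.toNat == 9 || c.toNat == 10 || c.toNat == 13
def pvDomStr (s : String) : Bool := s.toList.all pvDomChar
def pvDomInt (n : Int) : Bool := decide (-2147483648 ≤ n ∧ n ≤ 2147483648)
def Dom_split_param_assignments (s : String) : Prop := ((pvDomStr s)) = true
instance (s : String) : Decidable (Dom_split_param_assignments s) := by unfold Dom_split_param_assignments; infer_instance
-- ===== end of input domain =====

-- B replaces A's split-into-parts-then-rescan pipeline with a single-pass state machine
-- parsing directly to (name, value) pairs; objective: alternative (same asymptotic cost).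

-- ===== PORT A =====
-- state: (parts, depth, current)
def pvAStep (st : List (List Char) × Int × List Char) (ch : Char) :
    List (List Char) × Int × List Char :=
  if ch = '(' then (st.1, st.2.1 + 1, st.2.2 ++ [ch])
  else if ch = ')' then (st.1, st.2.1 - 1, st.2.2 ++ [ch])
  else if ch = ',' ∧ st.2.1 = 0 then (st.1 ++ [st.2.2], st.2.1, [])
  else (st.1, st.2.1, st.2.2 ++ [ch])

-- the body of A's second loop: part.split('=', 1) after the '=' in part test
def pvEmit (result : List (String × String)) (part : List Char) : List (String × String) :=
  if PySem.Chars.isIn ['='] part then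
    let pieces := PySem.Chars.splitOnMax part ['='] 1
    result ++ [(String.ofList (PySem.Chars.strip (pieces.headD [])),
                String.ofList (PySem.Chars.strip ((pieces.drop 1).headD [])))]
  else result

def split_param_assignments (s : String) : List (String × String) :=
  let st := s.toList.foldl pvAStep ([], 0, [])
  let parts := if PySem.Chars.strip st.2.2 ≠ [] then st.1 ++ [st.2.2] else st.1
  parts.foldl pvEmit []

-- ===== PORT B =====
def pvPush (name val : List Char) (seen : Bool) (ch : Char) : List Char × List Char :=
  if seen then (name, val ++ [ch]) else (name ++ [ch], val)

-- state: (result, depth, name, value, seen_eq)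
def pvBStep (st : List (String × String) × Int × List Char × List Char × Bool) (ch : Char) :
    List (String × String) × Int × List Char × List Char × Bool :=
  match st with
  | (res, depth, name, val, seen) =>
    if ch = '(' then (res, depth + 1, (pvPush name val seen ch).1, (pvPush name val seen ch).2, seen)
    else if ch = ')' then (res, depth - 1, (pvPush name val seen ch).1, (pvPush name val seen ch).2, seen)
    else if ch = ',' ∧ depth = 0 then
      (res ++ (if seen then [(String.ofList (PySem.Chars.strip name), String.ofList (PySem.Chars.strip val))] else []),
       depth, [], [], false)
    else if ch = '=' ∧ seen = false then (res, depth, name, val, true)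
    else (res, depth, (pvPush name val seen ch).1, (pvPush name val seen ch).2, seen)

def split_param_assignments_alt (s : String) : List (String × String) :=
  match s.toList.foldl pvBStep ([], 0, [], [], false) with
  | (res, _, name, val, seen) =>
    res ++ (if seen then [(String.ofList (PySem.Chars.strip name), String.ofList (PySem.Chars.strip val))] else [])

-- ===== PRECONDITION & SPEC =====
def Spec_split_param_assignments (s : String) (out : List (String × String)) : Prop := out = split_param_assignments_alt s
instance (s : String) (out : List (String × String)) : Decidable (Spec_split_param_assignments s out) := by unfold Spec_split_param_assignments; infer_instance

-- ===== CLAIM (what is proved, stated in full; the proofs are below) =====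
def Claim_equal_split_param_assignments : Prop := ∀ (s : String), Dom_split_param_assignments s → Spec_split_param_assignments s (split_param_assignments s)

-- ===== LEMMAS AND PROOFS =====

lemma pv_go_zero (f : Nat) (l cur : List Char) (acc : List (List Char)) :
    PySem.Chars.splitOnMax.go ['='] f 0 l cur acc = ((cur.reverse ++ l) :: acc).reverse := by
  cases f with
  | zero => simp [PySem.Chars.splitOnMax.go]
  | succ f => cases l <;> simp [PySem.Chars.splitOnMax.go]

lemma pv_go_one (n : List Char) : ∀ (f : Nat) (v cur : List Char) (acc : List (List Char)),
    '=' ∉ n → n.length < f →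
    PySem.Chars.splitOnMax.go ['='] f 1 (n ++ '=' :: v) cur acc
      = acc.reverse ++ [cur.reverse ++ n, v] := by
  induction n with
  | nil =>
    intro f v cur acc _ hf
    cases f with
    | zero => omega
    | succ f => simp [PySem.Chars.splitOnMax.go, List.isPrefixOf, pv_go_zero]
  | cons c rest ih =>
    intro f v cur acc hmem hf
    cases f with
    | zero => omega
    | succ f =>
      have hc : ¬ ('=' = c) := by intro h; exact hmem (by simp [← h])
      have hrest : '=' ∉ rest := fun h => hmem (List.mem_cons_of_mem _ h)
      simp only [List.cons_append, PySem.Chars.splitOnMax.go]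
      rw [if_neg (by omega : ¬ (1 = 0)), if_neg (by simp [List.isPrefixOf, hc])]
      rw [ih f v (c :: cur) acc hrest (by simpa using Nat.lt_of_succ_lt_succ hf)]
      simp

lemma pv_split_eq (n v : List Char) (h : '=' ∉ n) :
    PySem.Chars.splitOnMax (n ++ '=' :: v) ['='] 1 = [n, v] := by
  unfold PySem.Chars.splitOnMax
  rw [if_neg (by norm_num)]
  have := pv_go_one n ((n ++ '=' :: v).length + 1) v [] [] h (by simp)
  simpa using this

lemma pv_isIn_iff (l : List Char) : PySem.Chars.isIn ['='] l = true ↔ '=' ∈ l := by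
  rw [PySem.Chars.isIn_iff_infix]
  constructor
  · intro h; exact h.mem (by simp)
  · intro h
    obtain ⟨s, t, rfl⟩ := List.append_of_mem h
    exact ⟨s, t, by simp⟩

lemma pv_strip_ne_nil (l : List Char) (h : '=' ∈ l) : PySem.Chars.strip l ≠ [] := by
  intro hs
  unfold PySem.Chars.strip PySem.Chars.rstrip PySem.Chars.lstrip at hs
  have h1 : ∀ c ∈ (List.dropWhile PySem.Chars.isspace l).reverse, PySem.Chars.isspace c := by
    rw [← List.dropWhile_eq_nil_iff]
    simpa using congrArg List.reverse hs
  have hm : '=' ∈ List.dropWhile PySem.Chars.isspace l := by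
    have hsplit := List.takeWhile_append_dropWhile (p := PySem.Chars.isspace) (l := l)
    rw [← hsplit] at h
    rcases List.mem_append.1 h with h2 | h2
    · have := List.mem_takeWhile_imp h2
      exact absurd this (by decide)
    · exact h2
  have := h1 '=' (by simpa using hm)
  exact absurd this (by decide)

lemma pv_emit_hit (res : List (String × String)) (n v : List Char) (h : '=' ∉ n) :
    pvEmit res (n ++ '=' :: v)
      = res ++ [(String.ofList (PySem.Chars.strip n), String.ofList (PySem.Chars.strip v))] := by
  unfold pvEmit
  rw [if_pos ((pv_isIn_iff _).2 (by simp)), pv_split_eq n v h]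
  simp

lemma pv_emit_miss (res : List (String × String)) (p : List Char) (h : '=' ∉ p) :
    pvEmit res p = res := by
  unfold pvEmit
  rw [if_neg]
  simp [pv_isIn_iff, h]

-- the single loop invariant tying A's (parts, depth, current) to B's (res, depth, name, val, seen)
lemma pv_main (cs : List Char) :
    ∀ (parts : List (List Char)) (depth : Int) (name val : List Char) (seen : Bool)
      (res : List (String × String)),
      '=' ∉ name → (seen = false → val = []) →
      res = List.foldl pvEmit [] parts →
      (let st := List.foldl pvAStep (parts, depth, if seen then name ++ '=' :: val else name) cs
       (if PySem.Chars.strip st.2.2 ≠ [] then st.1 ++ [st.2.2] else st.1).foldl pvEmit [])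
      = (match List.foldl pvBStep (res, depth, name, val, seen) cs with
         | (res, _, name, val, seen) =>
           res ++ (if seen then [(String.ofList (PySem.Chars.strip name),
                                  String.ofList (PySem.Chars.strip val))] else [])) := by
  induction cs with
  | nil =>
    intro parts depth name val seen res hname hval hres
    cases seen with
    | false =>
      simp only [List.foldl, Bool.false_eq_true, if_false]
      by_cases h : PySem.Chars.strip name ≠ []
      · rw [if_pos h, List.foldl_append]
        simp [pv_emit_miss _ _ hname, hres]
      · rw [if_neg h]
        simp [hres]
    | true =>
      simp only [List.foldl, if_true]
      rw [if_pos (pv_strip_ne_nil _ (by simp)), List.foldl_append]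
      simp [pv_emit_hit _ _ _ hname, hres]
  | cons ch cs ih =>
    intro parts depth name val seen res hname hval hres
    simp only [List.foldl]
    by_cases h1 : ch = '('
    · subst h1
      cases seen with
      | true =>
        simpa [pvAStep, pvBStep, pvPush] using
          ih parts (depth + 1) name (val ++ ['(']) true res hname (by simp) hres
      | false =>
        simpa [pvAStep, pvBStep, pvPush, hval rfl] using
          ih parts (depth + 1) (name ++ ['(']) [] false res (by simp [hname]) (by simp) hres
    by_cases h2 : ch = ')'
    · subst h2
      cases seen with
      | true =>
        simpa [pvAStep, pvBStep, pvPush] using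
          ih parts (depth - 1) name (val ++ [')']) true res hname (by simp) hres
      | false =>
        simpa [pvAStep, pvBStep, pvPush, hval rfl] using
          ih parts (depth - 1) (name ++ [')']) [] false res (by simp [hname]) (by simp) hres
    by_cases h3 : ch = ',' ∧ depth = 0
    · obtain ⟨rfl, rfl⟩ := h3
      cases seen with
      | true =>
        have hres' :
            res ++ [(String.ofList (PySem.Chars.strip name), String.ofList (PySem.Chars.strip val))]
              = List.foldl pvEmit [] (parts ++ [name ++ '=' :: val]) := by
          rw [List.foldl_append, ← hres]
          simp [List.foldl, pv_emit_hit _ _ _ hname]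
        simpa [pvAStep, pvBStep, pvPush] using
          ih (parts ++ [name ++ '=' :: val]) 0 [] [] false
            (res ++ [(String.ofList (PySem.Chars.strip name), String.ofList (PySem.Chars.strip val))])
            (by simp) (by simp) hres'
      | false =>
        have hres' : res = List.foldl pvEmit [] (parts ++ [name]) := by
          rw [List.foldl_append, ← hres]
          simp [List.foldl, pv_emit_miss _ _ hname]
        simpa [pvAStep, pvBStep, pvPush, hval rfl] using
          ih (parts ++ [name]) 0 [] [] false res (by simp) (by simp) hres'
    by_cases h4 : ch = '='
    · subst h4
      cases seen with
      | true =>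
        simpa [pvAStep, pvBStep, pvPush, h3] using
          ih parts depth name (val ++ ['=']) true res hname (by simp) hres
      | false =>
        simpa [pvAStep, pvBStep, pvPush, h3, hval rfl] using
          ih parts depth name [] true res hname (by simp) hres
    · cases seen with
      | true =>
        simpa [pvAStep, pvBStep, pvPush, h1, h2, h3, h4] using
          ih parts depth name (val ++ [ch]) true res hname (by simp) hres
      | false =>
        simpa [pvAStep, pvBStep, pvPush, h1, h2, h3, h4, hval rfl] using
          ih parts depth (name ++ [ch]) [] false res (by simp [hname]; exact fun h => h4 h.symm) (by simp) hres

-- ===== VERDICT (by name: the statement is the Claim_ definition above) =====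
theorem split_param_assignments_spec : Claim_equal_split_param_assignments := by
  intro s _
  unfold Spec_split_param_assignments split_param_assignments split_param_assignments_alt
  simpa using pv_main s.toList [] 0 [] [] false [] (by simp) (by simp) rfl
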